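-- pv_equiv track=rewrite | github.com/ry4nn9/chess | pieces.py | findHorizontalBlock
-- ===== SOURCE A (Python) =====
-- def findHorizontalBlock(x, y, board):
--     horBoundRight = len(board) - 1 - x
--     horBoundLeft = -x
--     horBounds = list(range(horBoundLeft, horBoundRight+1))
--
--     leftBlock = None
--     rightBlock = None
--     i = 0
--
--     # horizontal bounds
--     while i < len(horBounds):
--         dx = horBounds[i]
--         if board[y][x+dx] != None and x+dx < x:
--             leftBlock = dx
--         elif board[y][x+dx] != None and x+dx > x:
--             rightBlock = dx
--             break
--         i += 1
--     if leftBlock == None: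
--         leftBlock = horBoundLeft
--     if rightBlock == None:
--         rightBlock = horBoundRight
--
--     return leftBlock, rightBlock
-- ===== SOURCE B (Python) =====
-- def findHorizontalBlock(x, y, board):
--     n = len(board)
--     rightBlock = n - 1 - x
--     for j in range(max(x + 1, 0), n):
--         if board[y][j] is not None:
--             rightBlock = j - x
--             break
--     leftBlock = -x
--     for j in range(min(x - 1, n - 1), -1, -1):
--         if board[y][j] is not None:
--             leftBlock = j - x
--             break
--     return leftBlock, rightBlock
-- ===== Notes on version B (the rewrite author's own statement) =====
-- stated objective: simpler
-- what changed: A builds an offset list range(-x, len-x) and runs one left-to-right pass with None sentinels and post-loop defaulting; B drops the offset list and sentinels and does two independent outward scans from x (rightward then leftward), each clamped to the board and breaking at the first blocker.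
import Mathlib
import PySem

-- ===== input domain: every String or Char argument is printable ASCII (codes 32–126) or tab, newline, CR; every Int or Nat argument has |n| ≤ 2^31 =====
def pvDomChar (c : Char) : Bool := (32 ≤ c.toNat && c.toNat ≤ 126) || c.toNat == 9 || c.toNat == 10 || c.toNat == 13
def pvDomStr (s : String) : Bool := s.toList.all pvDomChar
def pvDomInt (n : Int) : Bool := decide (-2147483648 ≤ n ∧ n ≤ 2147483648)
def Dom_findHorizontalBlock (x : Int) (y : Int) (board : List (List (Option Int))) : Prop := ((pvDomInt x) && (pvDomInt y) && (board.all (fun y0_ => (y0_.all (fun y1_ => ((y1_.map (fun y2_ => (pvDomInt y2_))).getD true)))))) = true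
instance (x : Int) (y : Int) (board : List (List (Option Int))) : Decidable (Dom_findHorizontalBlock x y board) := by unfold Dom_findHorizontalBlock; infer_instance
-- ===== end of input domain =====

-- B replaces A's single left-to-right pass over a precomputed offset list (with None
-- sentinels and post-loop defaulting) by two independent outward scans from x, clamped
-- to the board and breaking at the first blocker; objective: simpler.

-- ===== PORT A =====
-- A's while loop over horBounds: l/r are leftBlock/rightBlock, break returns immediately
def fhbLoop (x : Int) (row : List (Option Int)) : List Int → Option Int → Option Int → Option Int × Option Int
  | [], l, r => (l, r)
  | dx :: rest, l, r =>
    if (PySem.List.pyGet? row (x + dx)).getD none ≠ none ∧ x + dx < x then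
      fhbLoop x row rest (some dx) r
    else if (PySem.List.pyGet? row (x + dx)).getD none ≠ none ∧ x + dx > x then
      (l, some dx)
    else
      fhbLoop x row rest l r

def findHorizontalBlock (x : Int) (y : Int) (board : List (List (Option Int))) : Int × Int :=
  let horBoundRight : Int := (board.length : Int) - 1 - x
  let horBoundLeft : Int := -x
  let horBounds := PySem.List.pyRange horBoundLeft (horBoundRight + 1) 1
  let res := fhbLoop x ((PySem.List.pyGet? board y).getD []) horBounds none none
  (res.1.getD horBoundLeft, res.2.getD horBoundRight)

-- ===== PORT B =====
-- B's for-loop with break: first j in the list with a non-None cell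
def fhbScan (row : List (Option Int)) : List Int → Option Int
  | [] => none
  | j :: rest => if (PySem.List.pyGet? row j).getD none ≠ none then some j else fhbScan row rest

def findHorizontalBlock_alt (x : Int) (y : Int) (board : List (List (Option Int))) : Int × Int :=
  let n : Int := (board.length : Int)
  let row := (PySem.List.pyGet? board y).getD []
  let rightBlock := ((fhbScan row (PySem.List.pyRange (max (x + 1) 0) n 1)).map (· - x)).getD (n - 1 - x)
  let leftBlock := ((fhbScan row (PySem.List.pyRange (min (x - 1) (n - 1)) (-1) (-1))).map (· - x)).getD (-x)
  (leftBlock, rightBlock)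

-- ===== PRECONDITION & SPEC =====
-- Pre_ is exactly the inputs on which Python A returns: a nonempty board needs y in
-- Python's index range, and row y must either reach the board width or contain a
-- blocker strictly right of x inside the board (A breaks there before running off a
-- short row); on everything else A raises IndexError.
def Pre_findHorizontalBlock (x : Int) (y : Int) (board : List (List (Option Int))) : Prop :=
  board = [] ∨
    (PySem.Raise.InRange board.length y ∧
      ((board.length : Int) ≤ ((((PySem.List.pyGet? board y).getD []).length : Int)) ∨
        (((((PySem.List.pyGet? board y).getD []).take board.length).drop (x + 1).toNat).any
          (fun c => c ≠ none)) = true))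
instance (x : Int) (y : Int) (board : List (List (Option Int))) : Decidable (Pre_findHorizontalBlock x y board) := by unfold Pre_findHorizontalBlock; infer_instance

def pvWitness_findHorizontalBlock : Int × Int × List (List (Option Int)) :=
  (1, 0, [[some 1, none, some 2], [none, none, none], [none, none, none]])

def Spec_findHorizontalBlock (x : Int) (y : Int) (board : List (List (Option Int))) (out : Int × Int) : Prop := out = findHorizontalBlock_alt x y board
instance (x : Int) (y : Int) (board : List (List (Option Int))) (out : Int × Int) : Decidable (Spec_findHorizontalBlock x y board out) := by unfold Spec_findHorizontalBlock; infer_instance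

-- ===== CLAIM (what is proved, stated in full; the proofs are below) =====
def Claim_equal_findHorizontalBlock : Prop := ∀ (x : Int) (y : Int) (board : List (List (Option Int))), Dom_findHorizontalBlock x y board → Pre_findHorizontalBlock x y board → Spec_findHorizontalBlock x y board (findHorizontalBlock x y board)

-- ===== LEMMAS AND PROOFS =====

theorem fhbScan_append (row : List (Option Int)) (L M : List Int) :
    fhbScan row (L ++ M) = (fhbScan row L).or (fhbScan row M) := by
  induction L with
  | nil => simp [fhbScan]
  | cons j rest ih =>
    by_cases h : (PySem.List.pyGet? row j).getD none ≠ none <;>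
      simp [fhbScan, h, ih]

-- descending range: peel the smallest element off the right end
theorem pyRange_neg_one_append_right (b a : Int) (h : a ≤ b) :
    PySem.List.pyRange b (a - 1) (-1) = PySem.List.pyRange b a (-1) ++ [a] := by
  rw [PySem.List.pyRange_neg_one_eq_reverse, PySem.List.pyRange_neg_one_eq_reverse,
    show a - 1 + 1 = a by omega, PySem.List.pyRange_one_cons (by omega : a < b + 1)]
  simp

-- phase 1 of A's loop: offsets e-k..e-1 (all negative, e ≤ 0) never break and leave in
-- leftBlock the LAST blocker, i.e. the first blocker of the descending scan
theorem fhbLoop_phase1 (x : Int) (row : List (Option Int)) (k : Nat) :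
    ∀ (e : Int), e ≤ 0 → ∀ (rest : List Int) (l r : Option Int),
      fhbLoop x row (PySem.List.pyRange (e - (k : Int)) e 1 ++ rest) l r =
        fhbLoop x row rest
          (((fhbScan row (PySem.List.pyRange (x + e - 1) (x + e - (k : Int) - 1) (-1))).map (· - x)).or l) r := by
  induction k with
  | zero =>
    intro e _ rest l r
    rw [PySem.List.pyRange_one_eq_nil (by omega : e ≤ e - ((0:Nat) : Int)),
      PySem.List.pyRange_neg_one_eq_nil (by omega : x + e - 1 ≤ x + e - ((0:Nat) : Int) - 1)]
    simp [fhbScan]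
  | succ k ih =>
    intro e he rest l r
    rw [PySem.List.pyRange_one_cons (by push_cast; omega : e - ((k+1 : Nat) : Int) < e)]
    have hsh : e - ((k+1 : Nat) : Int) + 1 = e - (k : Int) := by push_cast; omega
    have happ : PySem.List.pyRange (x + e - 1) (x + e - ((k+1 : Nat) : Int) - 1) (-1) =
        PySem.List.pyRange (x + e - 1) (x + e - (k : Int) - 1) (-1) ++ [x + e - (k : Int) - 1] := by
      rw [show x + e - ((k+1 : Nat) : Int) - 1 = (x + e - (k : Int) - 1) - 1 by push_cast; omega,
        pyRange_neg_one_append_right _ _ (by omega)]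
    have hpos : x + (e - ((k+1 : Nat) : Int)) = x + e - (k : Int) - 1 := by push_cast; omega
    by_cases hc : (PySem.List.pyGet? row (x + (e - ((k+1 : Nat) : Int)))).getD none ≠ none
    · show fhbLoop x row (_ :: _) l r = _
      rw [fhbLoop]
      rw [if_pos ⟨hc, by push_cast; omega⟩, hsh, List.append_eq, ih e he, happ, fhbScan_append]
      congr 1
      cases hL : fhbScan row (PySem.List.pyRange (x + e - 1) (x + e - (k : Int) - 1) (-1)) with
      | some j => simp [Option.or]
      | none =>
        have hcell : (PySem.List.pyGet? row (x + e - (k : Int) - 1)).getD none ≠ none := by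
          rwa [hpos] at hc
        simp [fhbScan, hcell, Option.or]
        omega
    · show fhbLoop x row (_ :: _) l r = _
      rw [fhbLoop]
      rw [if_neg (by tauto), if_neg (by tauto), hsh, List.append_eq, ih e he, happ, fhbScan_append]
      congr 1
      cases hL : fhbScan row (PySem.List.pyRange (x + e - 1) (x + e - (k : Int) - 1) (-1)) with
      | some j => simp [Option.or]
      | none =>
        have hcell : ¬ (PySem.List.pyGet? row (x + e - (k : Int) - 1)).getD none ≠ none := by
          rwa [hpos] at hc
        simp [fhbScan, hcell, Option.or]

-- phase 2 of A's loop: positive offsets c..c+k-1, break at the first blocker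
theorem fhbLoop_phase2 (x : Int) (row : List (Option Int)) (k : Nat) :
    ∀ (c : Int) (l : Option Int), 0 < c →
      fhbLoop x row (PySem.List.pyRange c (c + (k : Int)) 1) l none =
        (l, (fhbScan row (PySem.List.pyRange (x + c) (x + c + (k : Int)) 1)).map (· - x)) := by
  induction k with
  | zero =>
    intro c l _
    rw [PySem.List.pyRange_one_eq_nil (by omega : c + ((0:Nat) : Int) ≤ c),
      PySem.List.pyRange_one_eq_nil (by omega : x + c + ((0:Nat) : Int) ≤ x + c)]
    simp [fhbLoop, fhbScan]
  | succ k ih =>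
    intro c l hc
    rw [PySem.List.pyRange_one_cons (by push_cast; omega : c < c + ((k+1 : Nat) : Int)),
      PySem.List.pyRange_one_cons (by push_cast; omega : x + c < x + c + ((k+1 : Nat) : Int))]
    by_cases hb : (PySem.List.pyGet? row (x + c)).getD none ≠ none
    · show fhbLoop x row (_ :: _) l none = _
      rw [fhbLoop, if_neg (fun h => absurd h.2 (by omega)), if_pos ⟨hb, by omega⟩]
      simp [fhbScan, hb]
    · show fhbLoop x row (_ :: _) l none = _
      rw [fhbLoop, if_neg (fun h => absurd h.2 (by omega)), if_neg (by tauto)]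
      have h1 : c + ((k+1 : Nat) : Int) = (c + 1) + (k : Int) := by push_cast; omega
      have h2 : x + c + ((k+1 : Nat) : Int) = x + (c + 1) + (k : Int) := by push_cast; omega
      rw [h1, ih (c + 1) l (by omega), fhbScan]
      rw [if_neg hb]
      congr 2
      rw [h2, show x + c + 1 = x + (c + 1) by omega]

-- ===== VERDICT =====
theorem findHorizontalBlock_spec : Claim_equal_findHorizontalBlock := by
  intro x y board _ _
  unfold Spec_findHorizontalBlock
  simp only [findHorizontalBlock, findHorizontalBlock_alt]
  set n : Int := (board.length : Int) with hn
  set row := (PySem.List.pyGet? board y).getD [] with hrow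
  have h1 : n - 1 - x + 1 = n - x := by omega
  rw [h1]
  have hn0 : 0 ≤ n := by omega
  rcases lt_or_ge x 0 with hx | hx0'
  · -- x < 0: the whole scan is to the right of x
    have hc : -x + (board.length : Int) = n - x := by omega
    have hmax : max (x + 1) 0 = 0 := by omega
    have hmin : min (x - 1) (n - 1) = x - 1 := by omega
    rw [← hc, fhbLoop_phase2 x row board.length (-x) none (by omega), hmax, hmin,
      PySem.List.pyRange_neg_one_eq_nil (by omega : x - 1 ≤ -1)]
    simp [fhbScan, show x + -x = 0 by omega]
    rw [hn]
  rcases lt_or_ge x n with hxn | hxn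
  · -- 0 < x < n: negative offsets, then 0, then positive offsets
    have hsplit : PySem.List.pyRange (-x) (n - x) 1 =
        PySem.List.pyRange (-x) 0 1 ++ (0 :: PySem.List.pyRange 1 (n - x) 1) := by
      rw [PySem.List.pyRange_one_append (-x) 0 (n - x) (by omega) (by omega),
        PySem.List.pyRange_one_cons (by omega : (0:Int) < n - x)]
      norm_num
    rw [hsplit]
    have hk1 : -x = 0 - ((x.toNat : Nat) : Int) := by omega
    rw [hk1, fhbLoop_phase1 x row x.toNat 0 (by omega)]
    rw [show x + 0 - ((x.toNat : Nat) : Int) - 1 = -1 by omega, show x + 0 - 1 = x - 1 by omega]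
    rw [fhbLoop]
    rw [if_neg (fun h => absurd h.2 (by omega)), if_neg (fun h => absurd h.2 (by omega))]
    have hk2 : n - x = 1 + ((n - x - 1).toNat : Int) := by omega
    rw [hk2, fhbLoop_phase2 x row (n - x - 1).toNat 1 _ (by omega)]
    rw [show x + 1 + ((n - x - 1).toNat : Int) = n by omega]
    have hmax : max (x + 1) 0 = x + 1 := by omega
    have hmin : min (x - 1) (n - 1) = x - 1 := by omega
    rw [hmax, hmin]
    cases hL : fhbScan row (PySem.List.pyRange (x - 1) (-1) (-1)) with
    | some j => simp [Option.or]
    | none => simp [Option.or]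
  · -- n ≤ x: the whole scan is to the left of x
    have hk : -x = (n - x) - ((board.length : Nat) : Int) := by omega
    have happend : PySem.List.pyRange (-x) (n - x) 1 =
        PySem.List.pyRange (-x) (n - x) 1 ++ [] := by simp
    rw [happend, hk, fhbLoop_phase1 x row board.length (n - x) (by omega), fhbLoop]
    rw [show x + (n - x) - 1 = n - 1 by omega,
      show x + (n - x) - ((board.length : Nat) : Int) - 1 = -1 by omega]
    have hmax : max (x + 1) 0 = x + 1 := by omega
    have hmin : min (x - 1) (n - 1) = n - 1 := by omega
    rw [hmax, hmin, PySem.List.pyRange_one_eq_nil (by omega : n ≤ x + 1)]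
    cases hL : fhbScan row (PySem.List.pyRange (n - 1) (-1) (-1)) with
    | some j => simp [fhbScan, Option.or]
    | none => simp [fhbScan, Option.or]
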